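-- pv_equiv track=rewrite | github.com/kietoichoiDXD/face-attendance-system | clean_comments.py | remove_js_comments
-- ===== SOURCE A (Python) =====
-- def remove_js_comments(content):
--     lines = content.split('\n')
--     result = []
--     i = 0
--
--     while i < len(lines):
--         line = lines[i]
--
--         if '//' in line:
--             idx = line.find('//')
--             if '"' not in line[:idx] and "'" not in line[:idx]:
--                 line = line[:idx].rstrip()
--
--         if line.strip().startswith('/*'):
--             start_idx = i
--             if '*/' in line:
--                 end_idx = line.find('*/')
--                 before = line[:line.find('/*')]
--                 after = line[end_idx+2:] if end_idx + 2 < len(line) else ''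
--                 line = (before + after).strip()
--                 result.append(line)
--             else:
--                 i += 1
--                 while i < len(lines):
--                     if '*/' in lines[i]:
--                         end_idx = lines[i].find('*/')
--                         after = lines[i][end_idx+2:].strip()
--                         if after:
--                             result.append(after)
--                         break
--                     i += 1
--             i += 1
--             continue
--
--         if line.strip():
--             result.append(line)
--         elif result and result[-1].strip():
--             result.append(line)
--
--         i += 1
--
--     return '\n'.join(result)
-- ===== SOURCE B (Python) =====
-- def remove_js_comments(content):
--     # Stage 1: resolve comments only, producing tagged pieces (text, direct);
--     # a multi-line block is skipped in one step by searching for its closing line.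
--     def strip_slash(line):
--         idx = line.find('//')
--         if idx != -1 and '"' not in line[:idx] and "'" not in line[:idx]:
--             return line[:idx].rstrip()
--         return line
--
--     lines = content.split('\n')
--     pieces = []
--     n = len(lines)
--     i = 0
--     while i < n:
--         line = strip_slash(lines[i])
--         if not line.strip().startswith('/*'):
--             pieces.append((line, False))
--             i += 1
--             continue
--         if '*/' in line:
--             pieces.append(((line[:line.find('/*')] + line[line.find('*/') + 2:]).strip(), True))
--             i += 1
--             continue
--         j = next((k for k in range(i + 1, n) if '*/' in lines[k]), None)
--         if j is None:
--             break
--         after = lines[j][lines[j].find('*/') + 2:].strip()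
--         if after:
--             pieces.append((after, True))
--         i = j + 1
--
--     # Stage 2: collapse runs of blank lines (comment outputs bypass the rule).
--     result = []
--     for text, direct in pieces:
--         if direct or text.strip():
--             result.append(text)
--         elif result and result[-1].strip():
--             result.append(text)
--     return '\n'.join(result)
-- ===== Notes on version B (the rewrite author's own statement) =====
-- stated objective: alternative
-- what changed: A's single interleaved while-loop is replaced by a two-stage pipeline: stage 1 resolves comments into tagged pieces, skipping each multi-line block in one step by searching for its closing line, and stage 2 is a separate pass that collapses blank-line runs.
import Mathlib
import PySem

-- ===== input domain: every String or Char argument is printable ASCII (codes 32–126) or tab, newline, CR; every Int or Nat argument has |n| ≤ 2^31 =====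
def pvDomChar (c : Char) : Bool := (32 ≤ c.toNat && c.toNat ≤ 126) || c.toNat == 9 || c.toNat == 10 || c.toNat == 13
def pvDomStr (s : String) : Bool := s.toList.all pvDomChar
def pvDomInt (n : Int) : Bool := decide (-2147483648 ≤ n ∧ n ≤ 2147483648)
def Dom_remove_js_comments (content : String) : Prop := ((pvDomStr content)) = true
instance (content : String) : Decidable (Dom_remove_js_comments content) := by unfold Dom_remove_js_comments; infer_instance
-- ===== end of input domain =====

-- B replaces A's single interleaved while-loop by a two-stage pipeline: stage 1 resolves
-- comments into tagged pieces (skipping a block in one step by searching for its closing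
-- line), stage 2 collapses blank-line runs; same return value, same cost (objective: alternative).

-- the '//' strip (identical snippet in both Pythons):
-- line = line[:idx].rstrip() unless a quote occurs before idx
def pvLineNoSlash (line0 : List Char) : List Char :=
  let idx := PySem.Chars.find line0 ['/', '/']
  if idx ≠ -1 then
    if !PySem.Chars.isIn ['"'] (PySem.Chars.slice line0 none (some idx)) &&
       !PySem.Chars.isIn ['\''] (PySem.Chars.slice line0 none (some idx)) then
      PySem.Chars.rstrip (PySem.Chars.slice line0 none (some idx))
    else line0
  else line0

-- after = l[l.find('*/')+2:].strip(); append only if non-empty (same snippet in both Pythons)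
def pvAppendAfter (result : List (List Char)) (l : List Char) : List (List Char) :=
  let after := PySem.Chars.strip
    (PySem.Chars.slice l (some (PySem.Chars.find l ['*', '/'] + 2)) none)
  if after = [] then result else result ++ [after]

-- ===== PORT A =====
-- A's inner 'while i < len(lines)' scan for '*/': returns (result', lines remaining after the closing line)
def pvAInner (ls : List (List Char)) (result : List (List Char)) :
    List (List Char) × List (List Char) :=
  match ls with
  | [] => (result, [])
  | l :: rest =>
    if PySem.Chars.isIn ['*', '/'] l then (pvAppendAfter result l, rest)
    else pvAInner rest result

theorem pvAInner_len_le (ls : List (List Char)) (result : List (List Char)) :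
    (pvAInner ls result).2.length ≤ ls.length := by
  induction ls generalizing result with
  | nil => simp [pvAInner]
  | cons l rest ih =>
    unfold pvAInner
    split
    · simp
    · exact Nat.le_succ_of_le (ih result)

-- A's empty-line dedup append at the bottom of its loop body
def pvDedup (result : List (List Char)) (line : List Char) : List (List Char) :=
  if PySem.Chars.strip line ≠ [] then result ++ [line]
  else
    match result.getLast? with
    | some last => if PySem.Chars.strip last ≠ [] then result ++ [line] else result
    | none => result

-- A's single-line '/* … */' value, with A's 'end_idx + 2 < len(line)' guard on the tail slice
def pvASingle (line : List Char) : List Char :=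
  let endIdx := PySem.Chars.find line ['*', '/']
  let before := PySem.Chars.slice line none (some (PySem.Chars.find line ['/', '*']))
  let after := if endIdx + 2 < PySem.Chars.len line then
      PySem.Chars.slice line (some (endIdx + 2)) none else []
  PySem.Chars.strip (before ++ after)

-- A's outer while-loop, the index i replaced by the suffix of lines still to process
def pvALoop (ls : List (List Char)) (result : List (List Char)) : List (List Char) :=
  match ls with
  | [] => result
  | line0 :: rest =>
    let line := pvLineNoSlash line0
    if PySem.Chars.startswith (PySem.Chars.strip line) ['/', '*'] then
      if PySem.Chars.isIn ['*', '/'] line then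
        pvALoop rest (result ++ [pvASingle line])
      else
        pvALoop (pvAInner rest result).2 (pvAInner rest result).1
    else pvALoop rest (pvDedup result line)
  termination_by ls.length
  decreasing_by
  · simp
  · exact Nat.lt_succ_of_le (pvAInner_len_le rest result)
  · simp

def remove_js_comments (content : String) : String :=
  String.ofList (PySem.Chars.join ['\n']
    (pvALoop (PySem.Chars.splitOn content.toList ['\n']) []))

-- ===== PORT B =====
-- B's 'next(k for k in range(i+1, n) if "*/" in lines[k])' search: the closing line and the suffix after it
def pvFindClose (ls : List (List Char)) : Option (List Char × List (List Char)) :=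
  match ls with
  | [] => none
  | l :: rest => if PySem.Chars.isIn ['*', '/'] l then some (l, rest) else pvFindClose rest

theorem pvFindClose_len {ls : List (List Char)} {cl : List Char} {rest' : List (List Char)}
    (h : pvFindClose ls = some (cl, rest')) : rest'.length < ls.length := by
  induction ls with
  | nil => simp [pvFindClose] at h
  | cons l rest ih =>
    unfold pvFindClose at h
    split at h
    · cases h; simp
    · exact Nat.lt_succ_of_lt (ih h)

-- B's single-line '/* … */' value (no guard: the tail slice is just line[find('*/')+2:])
def pvBSingle (line : List Char) : List Char :=
  PySem.Chars.strip
    (PySem.Chars.slice line none (some (PySem.Chars.find line ['/', '*'])) ++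
     PySem.Chars.slice line (some (PySem.Chars.find line ['*', '/'] + 2)) none)

-- B's stage 1: comment resolution into tagged pieces (text, direct)
def pvBEmit (ls : List (List Char)) : List (List Char × Bool) :=
  match ls with
  | [] => []
  | line0 :: rest =>
    let line := pvLineNoSlash line0
    if !PySem.Chars.startswith (PySem.Chars.strip line) ['/', '*'] then
      (line, false) :: pvBEmit rest
    else if PySem.Chars.isIn ['*', '/'] line then
      (pvBSingle line, true) :: pvBEmit rest
    else
      match hfc : pvFindClose rest with
      | none => []
      | some (cl, rest') =>
        let after := PySem.Chars.strip
          (PySem.Chars.slice cl (some (PySem.Chars.find cl ['*', '/'] + 2)) none)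
        if after = [] then pvBEmit rest' else (after, true) :: pvBEmit rest'
  termination_by ls.length
  decreasing_by
  · simp
  · simp
  · exact Nat.lt_succ_of_lt (pvFindClose_len hfc)
  · exact Nat.lt_succ_of_lt (pvFindClose_len hfc)

-- B's stage 2: the blank-line collapse over the pieces
def pvBCollapse (result : List (List Char)) (pieces : List (List Char × Bool)) :
    List (List Char) :=
  match pieces with
  | [] => result
  | (text, direct) :: rest =>
    if direct then pvBCollapse (result ++ [text]) rest
    else pvBCollapse (pvDedup result text) rest

def remove_js_comments_alt (content : String) : String :=
  String.ofList (PySem.Chars.join ['\n']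
    (pvBCollapse [] (pvBEmit (PySem.Chars.splitOn content.toList ['\n']))))

-- ===== PRECONDITION & SPEC =====
def Spec_remove_js_comments (content : String) (out : String) : Prop := out = remove_js_comments_alt content
instance (content : String) (out : String) : Decidable (Spec_remove_js_comments content out) := by unfold Spec_remove_js_comments; infer_instance

-- ===== CLAIM (what is proved, stated in full; the proofs are below) =====
def Claim_equal_remove_js_comments : Prop := ∀ (content : String), Dom_remove_js_comments content → Spec_remove_js_comments content (remove_js_comments content)

-- ===== LEMMAS AND PROOFS =====

-- A's guarded tail slice equals B's unguarded one: past the end, the slice is empty anyway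
theorem pvSingle_eq (line : List Char) (h : PySem.Chars.isIn ['*', '/'] line = true) :
    pvASingle line = pvBSingle line := by
  unfold pvASingle pvBSingle
  simp only
  split
  · rfl
  · rename_i hlt
    have hsl : PySem.Chars.slice line (some (PySem.Chars.find line ['*', '/'] + 2)) none = [] := by
      have hnn : (0:Int) ≤ PySem.Chars.find line ['*', '/'] :=
        (PySem.Chars.find_nonneg_iff line ['*', '/']).2
          ((PySem.Chars.isIn_iff_infix _ _).1 h)
      rw [PySem.Chars.slice_eq_listSlice, PySem.List.slice_from line (by omega)]
      refine List.drop_eq_nil_iff.2 ?_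
      have hlen : PySem.Chars.len line = (line.length : Int) := PySem.Chars.len_eq line
      omega
    rw [hsl]

-- A's inner scan, expressed by B's search for the closing line
theorem pvAInner_eq_findClose (ls : List (List Char)) (result : List (List Char)) :
    pvAInner ls result =
      match pvFindClose ls with
      | none => (result, [])
      | some (cl, rest') => (pvAppendAfter result cl, rest') := by
  induction ls generalizing result with
  | nil => simp [pvAInner, pvFindClose]
  | cons l rest ih =>
    unfold pvAInner pvFindClose
    split
    · rfl
    · exact ih result

-- the pipeline simulates A's interleaved loop: A's result equals stage 2 run over stage 1's pieces
theorem pvALoop_eq_pipeline (n : Nat) :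
    ∀ ls result, ls.length ≤ n →
      pvALoop ls result = pvBCollapse result (pvBEmit ls) := by
  induction n with
  | zero =>
    intro ls result h
    have hls : ls = [] := List.eq_nil_of_length_eq_zero (Nat.le_zero.1 h)
    subst hls
    simp [pvALoop, pvBEmit, pvBCollapse]
  | succ n ih =>
    intro ls result h
    match ls with
    | [] => simp [pvALoop, pvBEmit, pvBCollapse]
    | line0 :: rest =>
      have hr : rest.length ≤ n := Nat.succ_le_succ_iff.1 h
      by_cases hbs : PySem.Chars.startswith (PySem.Chars.strip (pvLineNoSlash line0)) ['/', '*'] = true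
      · by_cases hcl : PySem.Chars.isIn ['*', '/'] (pvLineNoSlash line0) = true
        · -- single-line block comment
          rw [pvALoop, pvBEmit]
          simp only [hbs, hcl, Bool.not_true, Bool.false_eq_true, if_false, if_true]
          rw [pvBCollapse, if_pos rfl, pvSingle_eq _ hcl]
          exact ih rest _ hr
        · -- multi-line block comment: A's inner scan vs B's search
          rw [pvALoop, pvBEmit]
          simp only [hbs, hcl, Bool.not_true, Bool.false_eq_true, if_false, if_true]
          rw [pvAInner_eq_findClose]
          cases hfc : pvFindClose rest with
          | none => simp [pvALoop, pvBCollapse]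
          | some p =>
            obtain ⟨cl, rest'⟩ := p
            have hr' : rest'.length ≤ n :=
              Nat.le_of_lt (Nat.lt_of_lt_of_le (pvFindClose_len hfc) hr)
            simp only
            rw [ih rest' (pvAppendAfter result cl) hr']
            by_cases ha : PySem.Chars.strip
                (PySem.List.slice cl (some (PySem.Chars.find cl ['*', '/'] + 2)) none) = []
            · simp [pvAppendAfter, ha]
            · simp [pvAppendAfter, ha, pvBCollapse]
      · -- plain line: A's dedup append vs B's stage-2 dedup
        rw [pvALoop, pvBEmit]
        simp only [hbs, Bool.false_eq_true, if_false, Bool.not_false, if_true]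
        rw [pvBCollapse, if_neg (by simp)]
        exact ih rest _ hr

-- ===== VERDICT (by name: the statement is the Claim_ definition above) =====
theorem remove_js_comments_spec : Claim_equal_remove_js_comments := by
  intro content _
  unfold Spec_remove_js_comments remove_js_comments remove_js_comments_alt
  rw [pvALoop_eq_pipeline (PySem.Chars.splitOn content.toList ['\n']).length
      (PySem.Chars.splitOn content.toList ['\n']) [] le_rfl]
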